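-- pv_equiv track=rewrite | github.com/Martin1458/simplePythonAI | GPT/compareSaturnin.py | sepatare_pth
-- ===== SOURCE A (Python) =====
-- pth_names = ["GPT_saturninV2", "GPT_saturninV2New"]
--
-- def sepatare_pth(p):
--     allListGod = []
--     for item in pth_names:
--         allListGod.append([])
--
--     smList = []
--     for prefix in pth_names:
--         sublist = []
--         for pth_name in p:
--             if pth_name.startswith(prefix) and all(pth_name != other_name for other_name in p if pth_name.startswith(prefix) and other_name != prefix):
--                 sublist.append(pth_name)
--         smList.append(sublist)
--
--     return smList
--
--     """
--     separated = [[pth_name for pth_name in p if pth_name.startswith(prefix) and all(pth_name)] for prefix in pth_names]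
--     """
--
--     return separated
-- ===== SOURCE B (Python) =====
-- pth_names = ["GPT_saturninV2", "GPT_saturninV2New"]
--
-- def sepatare_pth(p):
--     # A's convoluted all() condition reduces to "name equals the prefix":
--     # count occurrences of each prefix in one pass, then emit [prefix]*count.
--     counts = {name: 0 for name in pth_names}
--     for name in p:
--         if name in counts:
--             counts[name] += 1
--     return [[name] * counts[name] for name in pth_names]
-- ===== Notes on version B (the rewrite author's own statement) =====
-- stated objective: faster
-- what changed: A's nested all() check over p for every name and prefix reduces to 'name == prefix'; B makes one counting pass over p (dict of prefix counts) and emits [prefix]*count per prefix.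
import Mathlib
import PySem

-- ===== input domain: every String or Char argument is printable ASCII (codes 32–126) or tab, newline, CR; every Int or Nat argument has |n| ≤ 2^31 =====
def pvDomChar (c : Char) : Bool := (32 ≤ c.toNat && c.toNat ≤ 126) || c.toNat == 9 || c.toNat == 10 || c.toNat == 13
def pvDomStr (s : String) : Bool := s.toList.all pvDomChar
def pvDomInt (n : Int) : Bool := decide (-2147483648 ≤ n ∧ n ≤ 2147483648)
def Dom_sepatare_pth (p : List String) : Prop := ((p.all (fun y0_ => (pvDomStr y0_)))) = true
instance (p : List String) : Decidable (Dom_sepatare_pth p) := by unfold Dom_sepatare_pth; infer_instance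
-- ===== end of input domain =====

-- B replaces A's O(k·n²) nested all() scan by one counting pass over p: faster (asymptotic).

-- ===== PORT A =====
def pthNames : List String := ["GPT_saturninV2", "GPT_saturninV2New"]

def sepatare_pth (p : List String) : List (List String) :=
  -- allListGod is built and never used, exactly as in A
  let _allListGod : List (List String) :=
    pthNames.foldl (fun acc _ => acc ++ [([] : List String)]) []
  pthNames.foldl (fun smList prefix_ =>
    let sublist : List String :=
      p.foldl (fun sub pth_name =>
        if PySem.Str.startswith pth_name prefix_ &&
           p.all (fun other_name =>
             if PySem.Str.startswith pth_name prefix_ && other_name != prefix_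
             then pth_name != other_name else true)
        then sub ++ [pth_name] else sub) []
    smList ++ [sublist]) []

-- ===== PORT B =====
def sepatare_pth_alt (p : List String) : List (List String) :=
  let counts0 : PySem.Dict String Int :=
    pthNames.foldl (fun d name => d.insert name 0) PySem.Dict.empty
  let counts : PySem.Dict String Int :=
    p.foldl (fun d name => if d.contains name then d.modify name 0 (· + 1) else d) counts0
  pthNames.map (fun name => List.replicate (counts.getD name 0).toNat name)

-- ===== PRECONDITION & SPEC =====
def Spec_sepatare_pth (p : List String) (out : List (List String)) : Prop := out = sepatare_pth_alt p
instance (p : List String) (out : List (List String)) : Decidable (Spec_sepatare_pth p out) := by unfold Spec_sepatare_pth; infer_instance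

-- ===== CLAIM (what is proved, stated in full; the proofs are below) =====
def Claim_equal_sepatare_pth : Prop := ∀ (p : List String), Dom_sepatare_pth p → Spec_sepatare_pth p (sepatare_pth p)

-- ===== LEMMAS AND PROOFS =====

-- A's filter condition, evaluated at a member of p, is exactly "x == prefix".
theorem pvCondMem (p : List String) (pr x : String) (hx : x ∈ p) :
    (PySem.Str.startswith x pr &&
      p.all (fun y => if PySem.Str.startswith x pr && y != pr then x != y else true))
    = (x == pr) := by
  rw [Bool.eq_iff_iff, Bool.and_eq_true, List.all_eq_true, beq_iff_eq]
  constructor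
  · rintro ⟨hs, hall⟩
    by_contra hxp
    have h := hall x hx
    rw [if_pos (by rw [Bool.and_eq_true, bne_iff_ne]; exact ⟨hs, hxp⟩)] at h
    simp at h
  · rintro rfl
    have hs : PySem.Str.startswith x x = true := by
      simp [PySem.Chars.startswith_iff]
    refine ⟨hs, fun y _ => ?_⟩
    split_ifs with h
    · simp only [Bool.and_eq_true, bne_iff_ne, ne_eq] at h
      simp only [bne_iff_ne, ne_eq]
      exact fun he => h.2 he.symm
    · rfl

-- A's inner loop over p collects exactly the occurrences of the prefix.
theorem pvInnerA (p : List String) (pr : String) :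
    p.foldl (fun sub x =>
      if PySem.Str.startswith x pr &&
         p.all (fun y => if PySem.Str.startswith x pr && y != pr then x != y else true)
      then sub ++ [x] else sub) []
    = List.replicate (p.count pr) pr := by
  rw [PySem.List.foldl_append_if_eq_filter, List.nil_append]
  rw [List.filter_congr (fun x hx => pvCondMem p pr x hx)]
  induction p with
  | nil => simp
  | cons a t ih =>
    by_cases h : a = pr
    · simp [h, ih, List.replicate_succ]
    · simp [h, ih]

-- B's counting loop: getD of a key already present = initial value + count in p.
theorem pvCountLoop (p : List String) (d : PySem.Dict String Int) (pr : String)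
    (hpr : d.contains pr = true) :
    (p.foldl (fun (d : PySem.Dict String Int) name =>
        if d.contains name then d.modify name 0 (· + 1) else d) d).getD pr 0
      = d.getD pr 0 + p.count pr := by
  induction p generalizing d with
  | nil => simp
  | cons a t ih =>
    simp only [List.foldl_cons, List.count_cons]
    by_cases ha : a = pr
    · subst ha
      rw [if_pos hpr]
      rw [ih _ (by simp [PySem.Dict.contains_modify, hpr])]
      simp [PySem.Dict.getD_modify_self]
      ring
    · by_cases hc : d.contains a = true
      · rw [if_pos hc, ih _ (by simp [PySem.Dict.contains_modify, hpr]),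
            PySem.Dict.getD_modify]
        simp [ha, Ne.symm ha]
      · rw [if_neg (by simp [hc]), ih _ hpr]
        simp [ha]

-- B's final count for a prefix already keyed to 0 in the initial dict.
theorem pvCountB (p : List String) (pr : String) (d : PySem.Dict String Int)
    (hpr : d.contains pr = true) (h0 : d.getD pr 0 = 0) :
    ((p.foldl (fun (d : PySem.Dict String Int) name =>
        if d.contains name then d.modify name 0 (· + 1) else d) d).getD pr 0).toNat
      = p.count pr := by
  rw [pvCountLoop p d pr hpr, h0]
  simp

-- ===== VERDICT (by name: the statement is the Claim_ definition above) =====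
theorem sepatare_pth_spec : Claim_equal_sepatare_pth := by
  intro p _
  show sepatare_pth p = sepatare_pth_alt p
  unfold sepatare_pth sepatare_pth_alt
  simp only [pthNames, List.foldl_cons, List.foldl_nil, List.map_cons, List.map_nil,
    List.nil_append, List.singleton_append]
  rw [pvInnerA p "GPT_saturninV2", pvInnerA p "GPT_saturninV2New",
      pvCountB p "GPT_saturninV2" _ (by decide) (by decide),
      pvCountB p "GPT_saturninV2New" _ (by decide) (by decide)]
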